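-- pv_equiv track=rewrite | github.com/AnhTran1610/codility | card_payments/card_payments.py | solution
-- ===== SOURCE A (Python) =====
-- def solution(A, D):
--     obj = {}
--
--     for i in range(len(D)):
--         month = D[i].split('-')[1]
--
--         if A[i] < 0:
--             if month not in obj:
--                 obj[month] = {
--                     'totalPayment': abs(A[i]),
--                     'countPayment': 1,
--                 }
--             else:
--                 obj[month]['totalPayment'] += abs(A[i])
--                 obj[month]['countPayment'] += 1
--
--     total = sum(A)
--
--     for i in range(1, 13):
--         key = str(i).zfill(2)
--
--         if key not in obj:
--             total -= 5
--         elif obj[key]['totalPayment'] < 100 or obj[key]['countPayment'] < 3: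
--             total -= 5
--
--     return total
-- ===== SOURCE B (Python) =====
-- def solution(A, D):
--     total = sum(A)
--     for m in range(1, 13):
--         key = str(m).zfill(2)
--         s = 0
--         c = 0
--         for i in range(len(D)):
--             if A[i] < 0 and D[i].split('-')[1] == key:
--                 s -= A[i]
--                 c += 1
--         if s < 100 or c < 3:
--             total -= 5
--     return total
-- ===== Notes on version B (the rewrite author's own statement) =====
-- stated objective: alternative
-- what changed: B drops A's dict of per-month running totals entirely: it loops over the 12 month keys and for each one rescans the payments directly, counting and summing the matching negative ones, then subtracts 5 inside the same loop; no grouping structure is built.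
import Mathlib
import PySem

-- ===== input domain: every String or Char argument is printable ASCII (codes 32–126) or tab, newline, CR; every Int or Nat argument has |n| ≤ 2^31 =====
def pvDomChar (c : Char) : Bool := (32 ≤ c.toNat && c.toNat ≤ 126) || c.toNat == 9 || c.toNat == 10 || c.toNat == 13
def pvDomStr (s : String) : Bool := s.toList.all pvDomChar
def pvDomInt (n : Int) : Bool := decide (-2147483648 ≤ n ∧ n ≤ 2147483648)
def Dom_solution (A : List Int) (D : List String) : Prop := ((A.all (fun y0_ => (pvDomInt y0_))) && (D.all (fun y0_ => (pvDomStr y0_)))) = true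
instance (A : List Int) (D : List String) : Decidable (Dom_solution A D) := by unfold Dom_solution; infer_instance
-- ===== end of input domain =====

-- B drops the dict: for each of the 12 month keys it rescans the payments directly; same result,
-- alternative decomposition (no grouping structure), O(12n) instead of O(n).

-- shared helper: d.split('-')[1] (both Pythons compute this same subexpression)
def pvMonth (d : String) : String :=
  PySem.List.pyGetD ((PySem.Str.split? d "-").getD []) 1 ""

-- ===== PORT A =====
def solution (A : List Int) (D : List String) : Int :=
  let obj : PySem.Dict String (Int × Int) :=
    (PySem.List.pyRange 0 (D.length : Int) 1).foldl (fun obj i =>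
      let month := pvMonth (PySem.List.pyGetD D i "")
      if PySem.List.pyGetD A i 0 < 0 then
        if obj.contains month = false then
          obj.insert month (|PySem.List.pyGetD A i 0|, 1)
        else
          obj.insert month ((obj.getD month (0, 0)).1 + |PySem.List.pyGetD A i 0|,
                            (obj.getD month (0, 0)).2 + 1)
      else obj) PySem.Dict.empty
  (PySem.List.pyRange 1 13 1).foldl (fun total i =>
    let key := PySem.Str.zfill (PySem.Int.toStr i) 2
    if obj.contains key = false then total - 5
    else if (obj.getD key (0, 0)).1 < 100 ∨ (obj.getD key (0, 0)).2 < 3 then total - 5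
    else total) A.sum

-- ===== PORT B =====
def solution_alt (A : List Int) (D : List String) : Int :=
  (PySem.List.pyRange 1 13 1).foldl (fun total m =>
    let key := PySem.Str.zfill (PySem.Int.toStr m) 2
    let sc := (PySem.List.pyRange 0 (D.length : Int) 1).foldl (fun sc i =>
      if PySem.List.pyGetD A i 0 < 0 ∧ pvMonth (PySem.List.pyGetD D i "") = key then
        (sc.1 - PySem.List.pyGetD A i 0, sc.2 + 1)
      else sc)
      ((0 : Int), (0 : Int))
    if sc.1 < 100 ∨ sc.2 < 3 then total - 5 else total) A.sum

-- ===== PRECONDITION & SPEC =====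
-- Pre_ excludes exactly the inputs where the Python A raises IndexError: D longer than A
-- (A[i] out of range) or some date in D without a '-' (split('-')[1] out of range).
def Pre_solution (A : List Int) (D : List String) : Prop :=
  D.length ≤ A.length ∧ ∀ s ∈ D, '-' ∈ s.toList
instance (A : List Int) (D : List String) : Decidable (Pre_solution A D) := by
  unfold Pre_solution; infer_instance

def pvWitness_solution : List Int × List String :=
  ([1, -50, -60, -70], ["2020-01-01", "2020-01-02", "2020-01-03", "2020-01-04"])

def Spec_solution (A : List Int) (D : List String) (out : Int) : Prop := out = solution_alt A D
instance (A : List Int) (D : List String) (out : Int) : Decidable (Spec_solution A D out) := by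
  unfold Spec_solution; infer_instance

-- ===== CLAIM (what is proved, stated in full; the proofs are below) =====
def Claim_equal_solution : Prop := ∀ (A : List Int) (D : List String),
  Dom_solution A D → Pre_solution A D → Spec_solution A D (solution A D)

-- ===== LEMMAS AND PROOFS =====

-- A's grouping step as a function of the (payment, date) pair
def pvFA (g : PySem.Dict String (Int × Int)) (p : Int × String) : PySem.Dict String (Int × Int) :=
  if p.1 < 0 then
    if g.contains (pvMonth p.2) = false then g.insert (pvMonth p.2) (|p.1|, 1)
    else g.insert (pvMonth p.2) ((g.getD (pvMonth p.2) (0, 0)).1 + |p.1|,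
                                 (g.getD (pvMonth p.2) (0, 0)).2 + 1)
  else g

-- B's inner scan for one key
def pvScan (ps : List (Int × String)) (k : String) : Int × Int :=
  ps.foldl (fun sc p => if p.1 < 0 ∧ pvMonth p.2 = k then (sc.1 - p.1, sc.2 + 1) else sc) (0, 0)

def pvMatch (k : String) (p : Int × String) : Bool :=
  decide (p.1 < 0) && decide (pvMonth p.2 = k)

-- A's index loop is the fold of pvFA over zip (needs D no longer than A)
theorem pv_idx_eq_zip {γ : Type} (f : γ → Int × String → γ) :
    ∀ (D : List String) (A : List Int), D.length ≤ A.length → ∀ (g : γ),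
    (PySem.List.pyRange 0 (D.length : Int) 1).foldl
      (fun g i => f g (PySem.List.pyGetD A i 0, PySem.List.pyGetD D i "")) g
    = (A.zip D).foldl f g := by
  intro D
  induction D with
  | nil => intro A h g; simp [PySem.List.pyRange_one_eq_nil]
  | cons d D' ih =>
    intro A h g
    cases A with
    | nil => simp at h
    | cons a A' =>
      simp only [List.length_cons, List.zip_cons_cons, List.foldl_cons]
      push_cast
      rw [PySem.List.pyRange_one_cons (by positivity)]
      simp only [List.foldl_cons, PySem.List.pyGetD_zero_cons]
      rw [← ih A' (by simp at h; omega) (f g (a, d))]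
      rw [PySem.List.pyRange_one, PySem.List.pyRange_one, List.foldl_map, List.foldl_map]
      rw [show ((↑D'.length + 1 - (0 + 1) : Int)).toNat = ((↑D'.length - 0 : Int)).toNat by omega]
      congr 1
      funext g' k
      rw [show (0 : Int) + 1 + ↑k = ((k + 1 : Nat) : Int) by omega,
          show (0 : Int) + ↑k = ((k : Nat) : Int) by omega]
      rw [PySem.List.pyGetD_natCast, PySem.List.pyGetD_natCast,
          PySem.List.pyGetD_natCast, PySem.List.pyGetD_natCast]
      simp [List.getD]

-- B's scan from an arbitrary initial accumulator
theorem pv_scan_init (k : String) :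
    ∀ (ps : List (Int × String)) (init : Int × Int),
    ps.foldl (fun sc p => if p.1 < 0 ∧ pvMonth p.2 = k then (sc.1 - p.1, sc.2 + 1) else sc) init
    = init + pvScan ps k := by
  intro ps
  induction ps with
  | nil => intro init; simp [pvScan]
  | cons p ps ih =>
    intro init
    simp only [List.foldl_cons, pvScan] at *
    rw [ih, ih ((if p.1 < 0 ∧ pvMonth p.2 = k then ((0:Int) - p.1, (0:Int) + 1) else (0, 0)))]
    split_ifs with h
    · simp [Prod.ext_iff]
      constructor <;> ring
    · simp [Prod.ext_iff]

-- the value stored by A's grouping fold, per key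
theorem pv_getD (k : String) :
    ∀ (ps : List (Int × String)) (g : PySem.Dict String (Int × Int)),
    (ps.foldl pvFA g).getD k (0, 0) = g.getD k (0, 0) + pvScan ps k := by
  intro ps
  induction ps with
  | nil => intro g; simp [pvScan]
  | cons p ps ih =>
    intro g
    simp only [List.foldl_cons]
    rw [ih]
    have hstep : (pvFA g p).getD k (0, 0)
        = g.getD k (0, 0) + (if p.1 < 0 ∧ pvMonth p.2 = k then ((0:Int) - p.1, (0:Int) + 1) else (0, 0)) := by
      unfold pvFA
      by_cases hneg : p.1 < 0
      · rw [if_pos hneg]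
        by_cases hk : k = pvMonth p.2
        · by_cases hc : g.contains (pvMonth p.2) = false
          · rw [if_pos hc, PySem.Dict.getD_insert, if_pos hk, hk,
                PySem.Dict.getD_of_not_contains g (0, 0) hc]
            simp [hneg, hk.symm, abs_of_neg hneg]
          · rw [if_neg hc, PySem.Dict.getD_insert, if_pos hk, hk]
            simp [hneg, hk.symm, abs_of_neg hneg, Prod.ext_iff]
        · have hnm : ¬ (p.1 < 0 ∧ pvMonth p.2 = k) := fun h => hk h.2.symm
          rw [if_neg hnm]
          split_ifs with hc <;>
            · rw [PySem.Dict.getD_insert, if_neg hk]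
              simp
      · rw [if_neg hneg]; simp [hneg]
    rw [hstep, add_assoc]
    congr 1
    have := pv_scan_init k ps ((if p.1 < 0 ∧ pvMonth p.2 = k then ((0:Int) - p.1, (0:Int) + 1) else (0, 0)))
    simp only [pvScan, List.foldl_cons] at *
    rw [this]

-- which keys A's grouping fold contains
theorem pv_contains (k : String) :
    ∀ (ps : List (Int × String)) (g : PySem.Dict String (Int × Int)),
    (ps.foldl pvFA g).contains k = (g.contains k || ps.any (pvMatch k)) := by
  intro ps
  induction ps with
  | nil => intro g; simp
  | cons p ps ih =>
    intro g
    simp only [List.foldl_cons, List.any_cons]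
    rw [ih]
    have hstep : (pvFA g p).contains k = (g.contains k || pvMatch k p) := by
      unfold pvFA pvMatch
      by_cases hneg : p.1 < 0
      · rw [if_pos hneg]
        have hins : ∀ v : Int × Int, (g.insert (pvMonth p.2) v).contains k
            = (g.contains k || (decide (p.1 < 0) && decide (pvMonth p.2 = k))) := by
          intro v
          rw [PySem.Dict.contains_insert]
          by_cases hk : k = pvMonth p.2
          · simp [hk, hneg]
          · have h1 : (k == pvMonth p.2) = false := by simp [hk]
            have h2 : decide (pvMonth p.2 = k) = false := by
              exact decide_eq_false (fun h : pvMonth p.2 = k => hk h.symm)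
            rw [h1, h2]
            simp
        split_ifs with hc <;> exact hins _
      · rw [if_neg hneg]; simp [hneg]
    rw [hstep]
    cases g.contains k <;> cases pvMatch k p <;> simp
theorem pv_no_match (k : String) :
    ∀ (ps : List (Int × String)), ps.any (pvMatch k) = false → pvScan ps k = (0, 0) := by
  intro ps
  induction ps with
  | nil => intro _; simp [pvScan]
  | cons p ps ih =>
    intro h
    simp only [List.any_cons, Bool.or_eq_false_iff] at h
    have hm : ¬ (p.1 < 0 ∧ pvMonth p.2 = k) := by
      intro hcon; unfold pvMatch at h; simp [hcon.1, hcon.2] at h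
    simp only [pvScan, List.foldl_cons, if_neg hm]
    exact ih h.2

theorem main_eq (A : List Int) (D : List String) (hpre : D.length ≤ A.length) :
    solution A D = solution_alt A D := by
  unfold solution solution_alt
  dsimp only
  have hfa : (fun (obj : PySem.Dict String (Int × Int)) (i : Int) =>
      if PySem.List.pyGetD A i 0 < 0 then
        if obj.contains (pvMonth (PySem.List.pyGetD D i "")) = false then
          obj.insert (pvMonth (PySem.List.pyGetD D i "")) (|PySem.List.pyGetD A i 0|, 1)
        else
          obj.insert (pvMonth (PySem.List.pyGetD D i ""))
            ((obj.getD (pvMonth (PySem.List.pyGetD D i "")) (0, 0)).1 + |PySem.List.pyGetD A i 0|,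
             (obj.getD (pvMonth (PySem.List.pyGetD D i "")) (0, 0)).2 + 1)
      else obj)
      = (fun g i => pvFA g (PySem.List.pyGetD A i 0, PySem.List.pyGetD D i "")) := rfl
  rw [hfa, pv_idx_eq_zip pvFA D A hpre PySem.Dict.empty]
  set zs := A.zip D with hzs
  congr 1
  funext total m
  dsimp only
  set key := PySem.Str.zfill (PySem.Int.toStr m) 2 with hkey
  have hfb : (fun (sc : Int × Int) (i : Int) =>
      if PySem.List.pyGetD A i 0 < 0 ∧ pvMonth (PySem.List.pyGetD D i "") = key then
        (sc.1 - PySem.List.pyGetD A i 0, sc.2 + 1)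
      else sc)
      = (fun sc i => (fun (sc : Int × Int) (p : Int × String) =>
          if p.1 < 0 ∧ pvMonth p.2 = key then (sc.1 - p.1, sc.2 + 1) else sc) sc
            (PySem.List.pyGetD A i 0, PySem.List.pyGetD D i "")) := rfl
  rw [hfb, pv_idx_eq_zip (fun (sc : Int × Int) (p : Int × String) =>
        if p.1 < 0 ∧ pvMonth p.2 = key then (sc.1 - p.1, sc.2 + 1) else sc)
      D A hpre ((0 : Int), (0 : Int)), ← hzs]
  have hsc : zs.foldl (fun sc p =>
      if p.1 < 0 ∧ pvMonth p.2 = key then (sc.1 - p.1, sc.2 + 1) else sc) ((0:Int), (0:Int))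
      = pvScan zs key := rfl
  rw [hsc]
  have hgd := pv_getD key zs PySem.Dict.empty
  have hct := pv_contains key zs PySem.Dict.empty
  simp only [PySem.Dict.getD_empty, PySem.Dict.contains_empty, Bool.false_or] at hgd hct
  have hz : ((0, 0) : Int × Int) + pvScan zs key = pvScan zs key := by simp [Prod.ext_iff]
  rw [hz] at hgd
  rw [hgd, hct]
  by_cases hany : zs.any (pvMatch key) = true
  · rw [hany, if_neg (by simp)]
  · have hf : zs.any (pvMatch key) = false := by revert hany; cases zs.any (pvMatch key) <;> simp
    rw [hf, if_pos rfl, pv_no_match key zs hf]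
    rw [if_pos (by norm_num)]

-- ===== VERDICT (by name: the statement is the Claim_ definition above) =====
theorem solution_spec : Claim_equal_solution := by
  intro A D _ hpre
  exact main_eq A D hpre.1
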